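-- pv_equiv track=rewrite | github.com/Ansandr/debot | src/loader.py | getBitCoords
-- ===== SOURCE A (Python) =====
-- def getBitCoords(bit_x, bit_y) -> list[tuple[int,int]]:
--     bits = []
--
--     x = bit_x
--     y = bit_y
--     for i in range(1, 17):
--         if i % 4 == 0:
--             x += 22
--         else:
--             x += 17
--         bits.append((x, y))
--     return bits
-- ===== SOURCE B (Python) =====
-- def getBitCoords(bit_x, bit_y) -> list[tuple[int, int]]:
--     # closed form: after step i the x-offset is 17*i plus 5 for each 4th step so far
--     return [(bit_x + 17 * i + 5 * (i // 4), bit_y) for i in range(1, 17)]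
-- ===== Notes on version B (the rewrite author's own statement) =====
-- stated objective: simpler
-- what changed: Replaced the mutable running-x accumulator loop with a list comprehension computing each coordinate independently via the closed form 17*i + 5*(i//4).
import Mathlib
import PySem

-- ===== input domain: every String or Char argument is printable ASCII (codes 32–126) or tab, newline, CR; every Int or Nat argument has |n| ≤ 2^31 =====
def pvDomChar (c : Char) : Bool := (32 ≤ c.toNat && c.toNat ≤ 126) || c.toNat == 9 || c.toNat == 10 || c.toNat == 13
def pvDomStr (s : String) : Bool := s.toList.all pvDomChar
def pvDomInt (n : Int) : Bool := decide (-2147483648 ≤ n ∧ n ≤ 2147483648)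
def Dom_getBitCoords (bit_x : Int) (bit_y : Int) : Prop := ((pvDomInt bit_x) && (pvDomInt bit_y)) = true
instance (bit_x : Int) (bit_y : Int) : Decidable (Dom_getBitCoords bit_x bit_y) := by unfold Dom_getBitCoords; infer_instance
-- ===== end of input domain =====

-- B replaces the carried running-x accumulator with a per-element closed form; objective: simpler.


-- ===== PORT A =====
def getBitCoords (bit_x : Int) (bit_y : Int) : List (Int × Int) :=
  -- fold over range(1,17) carrying (x, bits), mirroring A's mutable accumulator
  (((PySem.List.pyRange 1 17 1).foldl
      (fun (st : Int × List (Int × Int)) (i : Int) =>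
        let x := if i % 4 == 0 then st.1 + 22 else st.1 + 17
        (x, st.2 ++ [(x, bit_y)]))
      (bit_x, []))).2

-- ===== PORT B =====
-- B: each element computed independently by the closed form 17*i + 5*(i//4)
def getBitCoords_alt (bit_x : Int) (bit_y : Int) : List (Int × Int) :=
  (PySem.List.pyRange 1 17 1).map
    (fun i => (bit_x + 17 * i + 5 * (PySem.Int.floordiv i 4), bit_y))

-- ===== PRECONDITION & SPEC =====
def Spec_getBitCoords (bit_x : Int) (bit_y : Int) (out : List (Int × Int)) : Prop := out = getBitCoords_alt bit_x bit_y
instance (bit_x : Int) (bit_y : Int) (out : List (Int × Int)) : Decidable (Spec_getBitCoords bit_x bit_y out) := by unfold Spec_getBitCoords; infer_instance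

-- ===== CLAIM (what is proved, stated in full; the proofs are below) =====
def Claim_equal_getBitCoords : Prop := ∀ (bit_x : Int) (bit_y : Int), Dom_getBitCoords bit_x bit_y → Spec_getBitCoords bit_x bit_y (getBitCoords bit_x bit_y)

-- ===== LEMMAS AND PROOFS =====

-- ===== VERDICT (by name: the statement is the Claim_ definition above) =====
theorem getBitCoords_spec : Claim_equal_getBitCoords := by
  intro bit_x bit_y _
  unfold Spec_getBitCoords getBitCoords getBitCoords_alt
  simp [PySem.List.pyRange, PySem.Int.floordiv, List.range_succ]
  omega
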